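-- pv_equiv track=rewrite | github.com/aayush17002/DumpCode | Dump/princessdragon.py | calans
-- ===== SOURCE A (Python) =====
-- def calans(arr,i,p,n):
-- 	arru = []
-- 	if(i!=0 or i!=(n-1)):
-- 		arru = arr[0:i]+arr[i+1:]
-- 	elif(i==0):
-- 		arru = arr[1:]
-- 	else:
-- 		arru = arr[:-1]
-- 	arru.sort(reverse=True)
-- 	r = 0
-- 	for i in arru:
-- 		if(p>0):
-- 			p -= i
-- 			r += 1
-- 		else:
-- 			break
-- 	if(p>0):
-- 		return n
-- 	return r
-- ===== SOURCE B (Python) =====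
-- def calans(arr, i, p, n):
--     if i == 0 and i == n - 1:
--         rest = arr[1:]
--     else:
--         rest = arr[0:i] + arr[i+1:]
--     r = 0
--     while p > 0 and rest:
--         m = max(rest)
--         rest.remove(m)
--         p -= m
--         r += 1
--     return n if p > 0 else r
-- ===== Notes on version B (the rewrite author's own statement) =====
-- stated objective: alternative
-- what changed: Replaces the full descending sort followed by a greedy scan with lazy selection: repeatedly extract the current maximum (max + remove) only while the target p is positive, terminating early instead of sorting the whole list.
import Mathlib
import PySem

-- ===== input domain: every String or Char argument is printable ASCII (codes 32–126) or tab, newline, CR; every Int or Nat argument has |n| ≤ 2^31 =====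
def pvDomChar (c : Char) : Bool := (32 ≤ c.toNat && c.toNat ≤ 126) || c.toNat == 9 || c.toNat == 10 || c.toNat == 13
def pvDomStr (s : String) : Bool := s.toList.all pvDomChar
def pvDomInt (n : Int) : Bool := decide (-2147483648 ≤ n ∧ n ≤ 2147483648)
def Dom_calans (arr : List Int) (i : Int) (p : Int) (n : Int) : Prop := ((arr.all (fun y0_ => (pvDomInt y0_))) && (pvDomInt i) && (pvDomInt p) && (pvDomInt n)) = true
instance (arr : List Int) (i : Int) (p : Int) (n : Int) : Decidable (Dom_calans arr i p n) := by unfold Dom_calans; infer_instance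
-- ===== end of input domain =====

-- B replaces A's full descending sort + greedy scan with lazy repeated-max extraction
-- that stops as soon as p ≤ 0 (alternative algorithm; return value proved equal).

-- ===== PORT A =====
-- the for-loop with break over the sorted list, state (p, r)
def calansLoopA : List Int → Int → Int → Int × Int
  | [], p, r => (p, r)
  | x :: xs, p, r => if p > 0 then calansLoopA xs (p - x) (r + 1) else (p, r)

def calans (arr : List Int) (i : Int) (p : Int) (n : Int) : Int :=
  let arru :=
    if i ≠ 0 ∨ i ≠ n - 1 then
      PySem.List.slice arr (some 0) (some i) ++ PySem.List.slice arr (some (i + 1)) none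
    else if i = 0 then PySem.List.slice arr (some 1) none
    else PySem.List.slice arr none (some (-1))
  let arru := PySem.List.sorted arru (fun x => x) true
  let pr := calansLoopA arru p 0
  if pr.1 > 0 then n else pr.2

-- ===== PORT B =====
-- while p > 0 and rest: m = max(rest); rest.remove(m); p -= m; r += 1
def calansLoopB (rest : List Int) (p r : Int) : Int × Int :=
  if p > 0 then
    if hr : rest = [] then (p, r)
    else
      let m := (PySem.List.max? rest (fun x => x)).getD 0
      calansLoopB (rest.erase m) (p - m) (r + 1)
  else (p, r)
termination_by rest.length
decreasing_by
  cases hmx : PySem.List.max? rest (fun x => x) with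
  | none => exact absurd ((PySem.List.max?_eq_none_iff _ _).mp hmx) hr
  | some m' =>
    have hm : m' ∈ rest := PySem.List.max?_mem hmx
    have h1 := List.length_erase_of_mem hm
    have h2 : 0 < rest.length := List.length_pos_iff.mpr hr
    simp only [Option.getD_some]
    omega

def calans_alt (arr : List Int) (i : Int) (p : Int) (n : Int) : Int :=
  let rest :=
    if i = 0 ∧ i = n - 1 then PySem.List.slice arr (some 1) none
    else PySem.List.slice arr (some 0) (some i) ++ PySem.List.slice arr (some (i + 1)) none
  let pr := calansLoopB rest p 0
  if pr.1 > 0 then n else pr.2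

-- ===== PRECONDITION & SPEC =====
def Spec_calans (arr : List Int) (i : Int) (p : Int) (n : Int) (out : Int) : Prop := out = calans_alt arr i p n
instance (arr : List Int) (i : Int) (p : Int) (n : Int) (out : Int) : Decidable (Spec_calans arr i p n out) := by unfold Spec_calans; infer_instance

-- ===== CLAIM (what is proved, stated in full; the proofs are below) =====
def Claim_equal_calans : Prop := ∀ (arr : List Int) (i : Int) (p : Int) (n : Int), Dom_calans arr i p n → Spec_calans arr i p n (calans arr i p n)

-- ===== LEMMAS AND PROOFS =====

-- pulling the maximum to the front of the descending sort
lemma sorted_rev_eq_max_cons (l : List Int) (m : Int)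
    (h : PySem.List.max? l (fun x => x) = some m) :
    PySem.List.sorted l (fun x => x) true =
      m :: PySem.List.sorted (l.erase m) (fun x => x) true := by
  haveI : Std.Antisymm (fun a b : Int => b ≤ a) := ⟨fun a b h1 h2 => le_antisymm h2 h1⟩
  have hm : m ∈ l := PySem.List.max?_mem h
  have hmax : ∀ y ∈ l, y ≤ m := by
    have := PySem.List.max?_isMax h; simpa using this
  refine List.Perm.eq_of_pairwise' (r := fun a b : Int => b ≤ a) ?_ ?_ ?_
  · simpa using PySem.List.sorted_pairwise_rev l (fun x => x)
  · refine List.pairwise_cons.mpr ⟨?_, by simpa using PySem.List.sorted_pairwise_rev (l.erase m) (fun x => x)⟩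
    intro y hy
    exact hmax y (List.mem_of_mem_erase ((PySem.List.mem_sorted _ _ _ _).mp hy))
  · exact (PySem.List.sorted_perm l (fun x => x) true).trans
      ((List.perm_cons_erase hm).trans
        ((PySem.List.sorted_perm (l.erase m) (fun x => x) true).symm.cons m))

lemma loop_eq : ∀ (N : ℕ) (l : List Int), l.length ≤ N → ∀ (p r : Int),
    calansLoopA (PySem.List.sorted l (fun x => x) true) p r = calansLoopB l p r := by
  intro N
  induction N with
  | zero =>
    intro l hl p r
    have : l = [] := List.length_eq_zero_iff.mp (Nat.le_zero.mp hl)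
    subst this
    rw [calansLoopB]
    simp [calansLoopA, PySem.List.sorted]
  | succ N ih =>
    intro l hl p r
    by_cases hp : p > 0
    · by_cases hnil : l = []
      · subst hnil
        rw [calansLoopB]
        simp [calansLoopA, PySem.List.sorted, hp]
      · cases hmx : PySem.List.max? l (fun x => x) with
        | none => exact absurd ((PySem.List.max?_eq_none_iff _ _).mp hmx) hnil
        | some m =>
          have hm : m ∈ l := PySem.List.max?_mem hmx
          rw [sorted_rev_eq_max_cons l m hmx]
          rw [calansLoopB]
          simp only [hp, if_true, hnil, dif_neg, not_false_iff, hmx, Option.getD_some]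
          
          rw [show calansLoopA (m :: PySem.List.sorted (l.erase m) (fun x => x) true) p r
                = calansLoopA (PySem.List.sorted (l.erase m) (fun x => x) true) (p - m) (r + 1) by
              simp [calansLoopA, hp]]
          exact ih (l.erase m) (by have := List.length_erase_of_mem hm
                                   have := List.length_pos_iff.mpr hnil; omega) (p - m) (r + 1)
    · rw [calansLoopB]
      simp only [hp, if_false]
      cases hs : PySem.List.sorted l (fun x => x) true with
      | nil => simp [calansLoopA]
      | cons x xs => simp [calansLoopA, hp]

-- ===== VERDICT (by name: the statement is the Claim_ definition above) =====
theorem calans_spec : Claim_equal_calans := by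
  intro arr i p n _
  unfold Spec_calans calans calans_alt
  by_cases hc : i = 0 ∧ i = n - 1
  · obtain ⟨h1, h2⟩ := hc
    subst h1
    simp only [show n - 1 = 0 from h2.symm]
    norm_num
    rw [loop_eq _ _ le_rfl]
  · have hcond : i ≠ 0 ∨ i ≠ n - 1 := by tauto
    simp only [if_pos hcond, if_neg hc]
    rw [loop_eq _ _ le_rfl]
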